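-- pv_equiv track=rewrite | github.com/cmayer/MitoGeneExtractor | snakemake/scripts/fasta_compare.py | select_sequences_for_process
-- ===== SOURCE A (Python) =====
-- def select_sequences_for_process(results):
--     """
--     Select the best sequences for a process based on ranking criteria.
--     First tries to find sequences with full_rank 1, then falls back to full_rank 2 if necessary.
--
--     Parameters:
--         results (list): List of sequence results for a process
--
--     Returns:
--         tuple: (best_full_sequence, best_barcode_sequence) or (None, None) if no qualifying sequences
--     """
--     #First try to find sequences with full_rank 1
--     rank1_sequences = [
--         result for result in results
--         if (result['full_rank'] == 1 and result['barcode_rank'] in [1, 2, 3])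
--     ]
--
--     #If we found rank 1 sequences, use those
--     if rank1_sequences:
--         #Sort by criteria
--         best_sequence = min(rank1_sequences, key=lambda x: (
--             x['barcode_rank'],
--             -x['barcode_longest_stretch'],
--             -x['longest_stretch']
--         ))
--         return best_sequence, best_sequence
--
--     #If no rank 1 sequences, try rank 2 sequences for barcode
--     rank2_sequences = [
--         result for result in results
--         if (result['full_rank'] == 2 and result['barcode_rank'] in [1, 2, 3])
--     ]
--
--     if rank2_sequences:
--         #Sort by criteria
--         best_sequence = min(rank2_sequences, key=lambda x: (
--             x['barcode_rank'],
--             -x['barcode_longest_stretch'],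
--             -x['longest_stretch']
--         ))
--         return None, best_sequence
--
--     return None, None
-- ===== SOURCE B (Python) =====
-- def _better(best, key, r):
--     """Keep the candidate with the strictly smaller key; ties keep the incumbent."""
--     if best is None or key < best[0]:
--         return (key, r)
--     return best
--
--
-- def select_sequences_for_process(results):
--     best_full = None
--     best_barcode = None
--     for r in results:
--         fr = r['full_rank']
--         if fr == 1 or fr == 2:
--             br = r['barcode_rank']
--             if br == 1 or br == 2 or br == 3:
--                 key = (br, -r['barcode_longest_stretch'], -r['longest_stretch'])
--                 if fr == 1:
--                     best_full = _better(best_full, key, r)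
--                 else:
--                     best_barcode = _better(best_barcode, key, r)
--     if best_full is not None:
--         return best_full[1], best_full[1]
--     if best_barcode is not None:
--         return None, best_barcode[1]
--     return None, None
-- ===== Notes on version B (the rewrite author's own statement) =====
-- stated objective: alternative
-- what changed: Replaces A's two filter-then-min passes (and the up-to-four key lookups per element repeated per pass) with one loop over results that maintains two running bests (full_rank 1 and full_rank 2) keyed by (barcode_rank, -barcode_longest_stretch, -longest_stretch) with strict-< updates, so ties keep the first-seen element exactly like min.
import Mathlib
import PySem

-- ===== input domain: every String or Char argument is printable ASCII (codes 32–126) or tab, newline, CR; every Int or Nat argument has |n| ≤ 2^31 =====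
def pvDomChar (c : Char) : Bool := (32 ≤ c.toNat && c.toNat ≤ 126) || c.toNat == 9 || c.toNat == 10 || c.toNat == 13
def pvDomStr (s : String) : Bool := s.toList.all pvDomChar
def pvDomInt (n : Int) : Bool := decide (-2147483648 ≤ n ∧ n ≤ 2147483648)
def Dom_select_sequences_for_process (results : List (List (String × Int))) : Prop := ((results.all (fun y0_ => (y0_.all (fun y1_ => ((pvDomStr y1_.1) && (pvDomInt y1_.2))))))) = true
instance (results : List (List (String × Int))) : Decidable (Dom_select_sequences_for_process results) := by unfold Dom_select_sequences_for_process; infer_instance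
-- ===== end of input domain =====

-- B replaces A's two filter-then-min passes with a single loop keeping two running bests (alternative decomposition, same cost).
-- Equivalence is about the RETURN value; neither program mutates its argument.

-- dict lookup on an association list: first match (exact for Python dicts, whose keys are unique)
def dgetD (r : List (String × Int)) (k : String) (dflt : Int) : Int :=
  match r.find? (fun p => p.1 == k) with
  | some p => p.2
  | none => dflt

-- Python tuple '<' on int triples: lexicographic (exact for int components)
def lexLt (a b : Int × Int × Int) : Bool :=
  a.1 < b.1 || (a.1 == b.1 && (a.2.1 < b.2.1 || (a.2.1 == b.2.1 && a.2.2 < b.2.2)))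

def keyOf (r : List (String × Int)) : Int × Int × Int :=
  (dgetD r "barcode_rank" 0, -(dgetD r "barcode_longest_stretch" 0), -(dgetD r "longest_stretch" 0))

-- ===== PORT A =====
-- min(xs, key=keyOf): scan, replace on strictly smaller key (first extremal wins)
def minByKey (x : List (String × Int)) (xs : List (List (String × Int))) : List (String × Int) :=
  xs.foldl (fun best r => if lexLt (keyOf r) (keyOf best) then r else best) x

def qualA (fr : Int) (r : List (String × Int)) : Bool :=
  dgetD r "full_rank" 0 == fr &&
    (dgetD r "barcode_rank" 0 == 1 || dgetD r "barcode_rank" 0 == 2 || dgetD r "barcode_rank" 0 == 3)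

def select_sequences_for_process (results : List (List (String × Int))) : (Option (List (String × Int))) × (Option (List (String × Int))) :=
  let rank1_sequences := results.filter (qualA 1)
  match rank1_sequences with
  | x :: xs =>
    let best_sequence := minByKey x xs
    (some best_sequence, some best_sequence)
  | [] =>
    let rank2_sequences := results.filter (qualA 2)
    match rank2_sequences with
    | x :: xs =>
      let best_sequence := minByKey x xs
      (none, some best_sequence)
    | [] => (none, none)

-- ===== PORT B =====
def better (best : Option ((Int × Int × Int) × List (String × Int))) (key : Int × Int × Int)
    (r : List (String × Int)) : Option ((Int × Int × Int) × List (String × Int)) :=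
  match best with
  | none => some (key, r)
  | some b => if lexLt key b.1 then some (key, r) else some b

def stepB (s : Option ((Int × Int × Int) × List (String × Int)) × Option ((Int × Int × Int) × List (String × Int)))
    (r : List (String × Int)) :
    Option ((Int × Int × Int) × List (String × Int)) × Option ((Int × Int × Int) × List (String × Int)) :=
  let fr := dgetD r "full_rank" 0
  if fr == 1 || fr == 2 then
    let br := dgetD r "barcode_rank" 0
    if br == 1 || br == 2 || br == 3 then
      let key := (br, -(dgetD r "barcode_longest_stretch" 0), -(dgetD r "longest_stretch" 0))
      if fr == 1 then (better s.1 key r, s.2) else (s.1, better s.2 key r)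
    else s
  else s

def select_sequences_for_process_alt (results : List (List (String × Int))) : (Option (List (String × Int))) × (Option (List (String × Int))) :=
  let s := results.foldl stepB (none, none)
  match s.1 with
  | some b => (some b.2, some b.2)
  | none =>
    match s.2 with
    | some b => (none, some b.2)
    | none => (none, none)

-- ===== PRECONDITION & SPEC =====
-- Pre_ excludes inputs where a needed dict key is missing: A raises KeyError there, except in the one
-- shielded corner (a full_rank-2 dict lacking keys while a qualifying full_rank-1 dict exists) where A
-- still returns but B's single pass naturally raises KeyError; that corner is excluded too (see cites).
def preOk (r : List (String × Int)) : Bool :=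
  match (r.find? (fun p => p.1 == "full_rank")).map (·.2) with
  | none => false
  | some fr =>
    if fr == 1 || fr == 2 then
      match (r.find? (fun p => p.1 == "barcode_rank")).map (·.2) with
      | none => false
      | some br =>
        if br == 1 || br == 2 || br == 3 then
          (r.find? (fun p => p.1 == "barcode_longest_stretch")).isSome &&
            (r.find? (fun p => p.1 == "longest_stretch")).isSome
        else true
    else true

def Pre_select_sequences_for_process (results : List (List (String × Int))) : Prop :=
  ∀ r ∈ results, preOk r = true

instance (results : List (List (String × Int))) : Decidable (Pre_select_sequences_for_process results) := by
  unfold Pre_select_sequences_for_process; infer_instance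

def pvWitness_select_sequences_for_process : (List (List (String × Int))) :=
  [[("full_rank", 1), ("barcode_rank", 2), ("barcode_longest_stretch", 10), ("longest_stretch", 12)],
   [("full_rank", 2), ("barcode_rank", 1), ("barcode_longest_stretch", 7), ("longest_stretch", 9)],
   [("full_rank", 0)]]

def Spec_select_sequences_for_process (results : List (List (String × Int))) (out : (Option (List (String × Int))) × (Option (List (String × Int)))) : Prop := out = select_sequences_for_process_alt results
instance (results : List (List (String × Int))) (out : (Option (List (String × Int))) × (Option (List (String × Int)))) : Decidable (Spec_select_sequences_for_process results out) := by unfold Spec_select_sequences_for_process; infer_instance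

-- ===== CLAIM (what is proved, stated in full; the proofs are below) =====
def Claim_equal_select_sequences_for_process : Prop := ∀ (results : List (List (String × Int))), Dom_select_sequences_for_process results → Pre_select_sequences_for_process results → Spec_select_sequences_for_process results (select_sequences_for_process results)

-- ===== LEMMAS AND PROOFS =====

def upd1 (o : Option ((Int × Int × Int) × List (String × Int))) (r : List (String × Int)) :
    Option ((Int × Int × Int) × List (String × Int)) :=
  if qualA 1 r then better o (keyOf r) r else o

def upd2 (o : Option ((Int × Int × Int) × List (String × Int))) (r : List (String × Int)) :
    Option ((Int × Int × Int) × List (String × Int)) :=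
  if qualA 2 r then better o (keyOf r) r else o

lemma stepB_eq (s : Option ((Int × Int × Int) × List (String × Int)) × Option ((Int × Int × Int) × List (String × Int)))
    (r : List (String × Int)) : stepB s r = (upd1 s.1 r, upd2 s.2 r) := by
  simp only [stepB, upd1, upd2, qualA, keyOf]
  by_cases h1 : dgetD r "full_rank" 0 = 1 <;>
    by_cases h2 : dgetD r "full_rank" 0 = 2 <;>
      simp [h1, h2] <;> split <;> simp_all

lemma foldl_pair (l : List (List (String × Int)))
    (bf bb : Option ((Int × Int × Int) × List (String × Int))) :
    l.foldl stepB (bf, bb) = (l.foldl upd1 bf, l.foldl upd2 bb) := by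
  induction l generalizing bf bb with
  | nil => rfl
  | cons r t ih => simp [List.foldl_cons, stepB_eq, ih]

lemma foldl_upd_filter (l : List (List (String × Int))) (fr : Int)
    (o : Option ((Int × Int × Int) × List (String × Int))) :
    l.foldl (fun o r => if qualA fr r then better o (keyOf r) r else o) o
      = (l.filter (qualA fr)).foldl (fun o r => better o (keyOf r) r) o := by
  induction l generalizing o with
  | nil => rfl
  | cons r t ih =>
    by_cases h : qualA fr r = true <;> simp [h, ih]

lemma minByKey_cons (x r : List (String × Int)) (t : List (List (String × Int))) :
    minByKey x (r :: t) = minByKey (if lexLt (keyOf r) (keyOf x) then r else x) t := by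
  simp [minByKey]

lemma foldl_better_min (xs : List (List (String × Int))) (x : List (String × Int)) :
    xs.foldl (fun o r => better o (keyOf r) r) (some (keyOf x, x))
      = some (keyOf (minByKey x xs), minByKey x xs) := by
  induction xs generalizing x with
  | nil => rfl
  | cons r t ih =>
    rw [List.foldl_cons, minByKey_cons]
    by_cases h : lexLt (keyOf r) (keyOf x) = true
    · rw [show better (some (keyOf x, x)) (keyOf r) r = some (keyOf r, r) by simp [better, h],
        ih, if_pos h]
    · rw [show better (some (keyOf x, x)) (keyOf r) r = some (keyOf x, x) by simp [better, h],
        ih, if_neg h]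

lemma foldl_better_cons (x : List (String × Int)) (xs : List (List (String × Int))) :
    ((x :: xs : List (List (String × Int))).foldl (fun o r => better o (keyOf r) r) none)
      = some (keyOf (minByKey x xs), minByKey x xs) := by
  rw [List.foldl_cons]
  exact foldl_better_min xs x

lemma ports_agree (results : List (List (String × Int))) :
    select_sequences_for_process results = select_sequences_for_process_alt results := by
  unfold select_sequences_for_process select_sequences_for_process_alt
  rw [foldl_pair]
  show _ = (match results.foldl upd1 none with
    | some b => (some b.2, some b.2)
    | none => match results.foldl upd2 none with
      | some b => (none, some b.2)
      | none => (none, none))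
  have e1 : results.foldl upd1 none
      = (results.filter (qualA 1)).foldl (fun o r => better o (keyOf r) r) none :=
    foldl_upd_filter results 1 none
  have e2 : results.foldl upd2 none
      = (results.filter (qualA 2)).foldl (fun o r => better o (keyOf r) r) none :=
    foldl_upd_filter results 2 none
  rw [e1, e2]
  cases h1 : results.filter (qualA 1) with
  | cons x xs => rw [foldl_better_cons]
  | nil =>
    cases h2 : results.filter (qualA 2) with
    | cons x xs => rw [foldl_better_cons]; rfl
    | nil => rfl

-- ===== VERDICT (by name: the statement is the Claim_ definition above) =====
theorem select_sequences_for_process_spec : Claim_equal_select_sequences_for_process := by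
  intro results _ _
  exact ports_agree results
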